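-- pv_equiv track=rewrite | github.com/MilanPecov/15-Puzzle-Solvers | fifteen_puzzle_solvers/domain/puzzle.py | generate_end_position
-- ===== SOURCE A (Python) =====
-- def generate_end_position(size):
--     end_position = []
--     new_row = []
--     for i in range(1, size * size + 1):
--         new_row.append(i)
--         if len(new_row) == size:
--             end_position.append(new_row)
--             new_row = []
--     end_position[-1][-1] = 0
--     return end_position
-- ===== SOURCE B (Python) =====
-- def generate_end_position(size):
--     nums = list(range(1, size * size)) + [0]
--     return [nums[i * size:(i + 1) * size] for i in range(size)]
-- ===== Notes on version B (the rewrite author's own statement) =====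
-- stated objective: simpler
-- what changed: B builds the whole flat sequence 1..n^2-1 followed by 0 and cuts it into rows by slicing, instead of accumulating elements one at a time with a row-reset-on-length loop followed by an in-place [-1][-1] patch.
-- outside the precondition, e.g. on generate_end_position(0): A raises IndexError, B returns []
import Mathlib
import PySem

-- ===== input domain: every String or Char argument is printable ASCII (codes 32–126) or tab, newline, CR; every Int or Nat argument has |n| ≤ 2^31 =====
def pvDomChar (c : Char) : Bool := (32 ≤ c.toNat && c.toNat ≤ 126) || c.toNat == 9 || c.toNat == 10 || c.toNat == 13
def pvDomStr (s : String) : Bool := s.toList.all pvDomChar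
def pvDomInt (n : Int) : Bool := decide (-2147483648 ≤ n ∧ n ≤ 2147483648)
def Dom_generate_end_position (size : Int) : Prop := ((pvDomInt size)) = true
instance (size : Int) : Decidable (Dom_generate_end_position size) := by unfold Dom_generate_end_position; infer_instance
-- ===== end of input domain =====

-- B builds the flat sequence 1..n^2-1,0 and slices it into rows, instead of A's
-- element-by-element accumulation with row reset and a final in-place patch (objective: simpler).


-- ===== PORT A =====
-- literal transliteration of A: fold accumulating (end_position, new_row), then the
-- in-place patch end_position[-1][-1] = 0 via pyGetD/pySetD (total only under Pre_, size ≥ 1)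
def generate_end_position (size : Int) : List (List Int) :=
  let st := (PySem.List.pyRange 1 (size * size + 1) 1).foldl
    (fun (st : List (List Int) × List Int) i =>
      let new_row := st.2 ++ [i]
      if (new_row.length : Int) = size then (st.1 ++ [new_row], []) else (st.1, new_row))
    ([], [])
  let ep := st.1
  PySem.List.pySetD ep (-1) (PySem.List.pySetD (PySem.List.pyGetD ep (-1) []) (-1) 0)

-- ===== PORT B =====
-- literal transliteration of B: nums = list(range(1, size*size)) + [0];
-- [nums[i*size:(i+1)*size] for i in range(size)]
def generate_end_position_alt (size : Int) : List (List Int) :=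
  let nums := PySem.List.pyRange 1 (size * size) 1 ++ [0]
  (PySem.List.pyRange 0 size 1).map
    (fun i => PySem.List.slice nums (some (i * size)) (some ((i + 1) * size)))

-- ===== PRECONDITION & SPEC =====
-- Pre_ excludes size ≤ 0, on which A raises IndexError at end_position[-1][-1] = 0.
def Pre_generate_end_position (size : Int) : Prop := 1 ≤ size
instance (size : Int) : Decidable (Pre_generate_end_position size) := by unfold Pre_generate_end_position; infer_instance
def pvWitness_generate_end_position : Int := 3

def Spec_generate_end_position (size : Int) (out : List (List Int)) : Prop := out = generate_end_position_alt size
instance (size : Int) (out : List (List Int)) : Decidable (Spec_generate_end_position size out) := by unfold Spec_generate_end_position; infer_instance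

-- ===== CLAIM (what is proved, stated in full; the proofs are below) =====
def Claim_equal_generate_end_position : Prop := ∀ (size : Int), Dom_generate_end_position size → Pre_generate_end_position size → Spec_generate_end_position size (generate_end_position size)

-- ===== LEMMAS AND PROOFS =====

def pvStep (s : Int) (st : List (List Int) × List Int) (i : Int) : List (List Int) × List Int :=
  let new_row := st.2 ++ [i]
  if (new_row.length : Int) = s then (st.1 ++ [new_row], []) else (st.1, new_row)

theorem pvFillRow (s : Int) (k : Nat) : ∀ (row : List Int) (acc : List (List Int)) (a : Int),
    (row.length : Int) + k + 1 = s →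
    (PySem.List.pyRange a (a + (k + 1 : Nat)) 1).foldl (pvStep s) (acc, row)
      = (acc ++ [row ++ PySem.List.pyRange a (a + (k + 1 : Nat)) 1], []) := by
  induction k with
  | zero =>
    intro row acc a h
    have h1 : a + ((0 + 1 : Nat) : Int) = a + 1 := by push_cast; ring
    rw [h1, PySem.List.pyRange_one_singleton]
    simp [pvStep]
    omega
  | succ k ih =>
    intro row acc a h
    have hlt : a < a + ((k + 1 + 1 : Nat) : Int) := by push_cast; omega
    rw [PySem.List.pyRange_one_cons hlt]
    simp only [List.foldl_cons]
    have hcond : ¬ ((((row ++ [a]).length : Nat) : Int) = s) := by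
      simp; omega
    have hstep : pvStep s (acc, row) a = (acc, row ++ [a]) := by
      simp [pvStep]; omega
    rw [hstep]
    have h2 : a + ((k + 1 + 1 : Nat) : Int) = (a + 1) + ((k + 1 : Nat) : Int) := by push_cast; ring
    rw [h2, ih (row ++ [a]) acc (a + 1) (by simp; push_cast at h ⊢; omega)]
    have h3 : a < (a + 1) + ((k + 1 : Nat) : Int) := by push_cast; omega
    simp

theorem pvRows (s : Int) (hs : 1 ≤ s) (q : Nat) : ∀ (acc : List (List Int)) (a : Int),
    (PySem.List.pyRange a (a + q * s) 1).foldl (pvStep s) (acc, []) =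
      (acc ++ (List.range q).map
        (fun j : Nat => PySem.List.pyRange (a + (j:Int) * s) (a + (j:Int) * s + s) 1), []) := by
  induction q with
  | zero =>
    intro acc a
    rw [show a + (0:Nat) * s = a by push_cast; ring, PySem.List.pyRange_one_eq_nil le_rfl]
    simp
  | succ q ih =>
    intro acc a
    have hsplit : PySem.List.pyRange a (a + (q+1:Nat) * s) 1
        = PySem.List.pyRange a (a + s) 1 ++ PySem.List.pyRange (a + s) (a + (q+1:Nat) * s) 1 :=
      PySem.List.pyRange_one_append a (a + s) _ (by omega) (by push_cast; nlinarith)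
    rw [hsplit, List.foldl_append]
    obtain ⟨k, hk⟩ : ∃ k : Nat, ((k:Int) + 1) = s := ⟨(s - 1).toNat, by omega⟩
    have hfill := pvFillRow s k [] acc a (by simpa using hk)
    rw [show a + s = a + ((k+1:Nat):Int) by push_cast; omega] at hsplit ⊢
    rw [hfill]
    rw [show a + ((q+1:Nat):Int) * s = (a + ((k+1:Nat):Int)) + (q:Nat) * s by push_cast; nlinarith [hk]]
    rw [ih]
    rw [List.range_succ_eq_map]
    simp only [List.map_cons, List.map_map, List.append_assoc, List.singleton_append,
      List.nil_append, Nat.cast_zero, zero_mul, add_zero]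
    simp only [Prod.mk.injEq, and_true, List.append_right_inj, List.cons.injEq]
    refine ⟨by congr 1; push_cast; omega, ?_⟩
    apply List.map_congr_left
    intro j _
    simp only [Function.comp, Nat.succ_eq_add_one]
    rw [show a + ((k+1:Nat):Int) + (j:Int) * s = a + ((j+1:Nat):Int) * s by
      push_cast; linear_combination hk]

theorem pvSetLast {α : Type} (xs : List α) (x v : α) :
    PySem.List.pySetD (xs ++ [x]) (-1) v = xs ++ [v] := by
  simp [PySem.List.pySetD, PySem.List.pySet?, PySem.List.pyIdx?]

-- row j of the flat list cut at [j*n, (j+1)*n), for j < n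
theorem pvSliceRow (n j : Nat) (hn : 1 ≤ n) (hj : j < n) :
    PySem.List.slice (PySem.List.pyRange 1 ((n:Int) * n) 1 ++ [0])
        (some ((j:Int) * n)) (some (((j:Int) + 1) * n)) =
      (if j = n - 1
        then PySem.List.pyRange (1 + (j:Int) * n) ((j:Int) * n + n) 1 ++ [0]
        else PySem.List.pyRange (1 + (j:Int) * n) (1 + (j:Int) * n + n) 1) := by
  have hcast1 : (j:Int) * n = ((j * n : Nat) : Int) := by push_cast; ring
  have hcast2 : ((j:Int) + 1) * n = (((j + 1) * n : Nat) : Int) := by push_cast; ring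
  have hnn : (n:Int) * n = ((n * n : Nat) : Int) := by push_cast; ring
  have hjn1 : (j + 1) * n ≤ n * n := Nat.mul_le_mul_right n hj
  have hjn0 : j * n + n = (j + 1) * n := by rw [Nat.succ_mul]
  rw [hcast1, hcast2, hnn, PySem.List.slice_natCast]
  have hsplit : PySem.List.pyRange 1 (((n*n : Nat)):Int) 1
      = PySem.List.pyRange 1 (1 + ((j*n : Nat):Int)) 1
        ++ PySem.List.pyRange (1 + ((j*n : Nat):Int)) ((n*n : Nat):Int) 1 :=
    PySem.List.pyRange_one_append _ _ _ (by push_cast; omega) (by push_cast; omega)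
  have hlen1 : (PySem.List.pyRange 1 (1 + ((j*n : Nat):Int)) 1).length = j * n := by
    rw [PySem.List.length_pyRange_one]; omega
  rw [hsplit, List.append_assoc, List.drop_left' hlen1]
  have htake : (j + 1) * n - j * n = n := by omega
  rw [htake]
  by_cases hlast : j = n - 1
  · rw [if_pos hlast]
    have hend : ((n*n : Nat):Int) = (j:Int) * n + n := by
      have hj1 : j + 1 = n := by omega
      have : n * n = j * n + n := by nth_rewrite 1 [← hj1]; rw [Nat.succ_mul]
      rw [this]; push_cast; ring
    have hlen2 : (PySem.List.pyRange (1 + ((j*n : Nat):Int)) ((n*n : Nat):Int) 1 ++ [(0:Int)]).length = n := by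
      rw [List.length_append, PySem.List.length_pyRange_one]
      simp only [List.length_singleton]
      have hj1 : j + 1 = n := by omega
      have : n * n = j * n + n := by nth_rewrite 1 [← hj1]; rw [Nat.succ_mul]
      omega
    rw [List.take_of_length_le (le_of_eq hlen2), hend, hcast1]
  · rw [if_neg hlast]
    have hjn2 : (j + 1) * n + 1 ≤ n * n := by
      have hj2 : j + 1 ≤ n - 1 := by omega
      have := Nat.mul_le_mul_right n hj2
      have h3 : (n - 1) * n = n * n - n := by rw [Nat.sub_mul]; simp
      omega
    have hsplit2 : PySem.List.pyRange (1 + ((j*n : Nat):Int)) ((n*n : Nat):Int) 1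
        = PySem.List.pyRange (1 + ((j*n : Nat):Int)) (1 + ((j*n : Nat):Int) + n) 1
          ++ PySem.List.pyRange (1 + ((j*n : Nat):Int) + n) ((n*n : Nat):Int) 1 :=
      PySem.List.pyRange_one_append _ _ _ (by push_cast; omega) (by push_cast; omega)
    have hlen3 : (PySem.List.pyRange (1 + ((j*n : Nat):Int)) (1 + ((j*n : Nat):Int) + n) 1).length = n := by
      rw [PySem.List.length_pyRange_one]; omega
    rw [hsplit2, List.append_assoc, List.take_left' hlen3]

theorem pvMain (s : Int) (hs : 1 ≤ s) :
    generate_end_position s = generate_end_position_alt s := by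
  obtain ⟨n, rfl⟩ := Int.eq_ofNat_of_zero_le (by omega : (0:Int) ≤ s)
  have hn : 1 ≤ n := by exact_mod_cast hs
  obtain ⟨m, rfl⟩ : ∃ m, n = m + 1 := ⟨n - 1, by omega⟩
  simp only [generate_end_position, generate_end_position_alt]
  -- the fold body is pvStep
  have hstep : (fun (st : List (List Int) × List Int) (i : Int) =>
      let new_row := st.2 ++ [i]
      if (new_row.length : Int) = ((m+1 : Nat) : Int) then (st.1 ++ [new_row], []) else (st.1, new_row))
      = pvStep ((m+1 : Nat) : Int) := rfl
  rw [hstep]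
  rw [show ((m+1 : Nat) : Int) * ((m+1 : Nat) : Int) + 1
      = 1 + ((m+1 : Nat) : Int) * ((m+1 : Nat) : Int) by ring]
  have hrows := pvRows ((m+1 : Nat) : Int) hs (m+1) [] 1
  rw [hrows]
  simp only [List.nil_append]
  -- split off the last row on the A side
  rw [List.range_succ, List.map_append, List.map_singleton]
  rw [PySem.List.pyGetD_neg_one_append_singleton]
  rw [show 1 + ((m:Nat) : Int) * ((m+1 : Nat) : Int) + ((m+1 : Nat) : Int)
      = (((m:Nat) : Int) * ((m+1 : Nat) : Int) + ((m+1 : Nat) : Int)) + 1 by ring]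
  rw [PySem.List.pyRange_one_succ_right (by push_cast; nlinarith)]
  rw [pvSetLast, pvSetLast]
  -- B side: turn range(0, n) into List.range
  rw [PySem.List.pyRange_zero_nat, List.map_map]
  rw [List.range_succ, List.map_append, List.map_singleton]
  congr 1
  · -- the first m rows agree
    apply List.map_congr_left
    intro j hj
    have hjm : j < m := List.mem_range.mp hj
    simp only [Function.comp]
    rw [pvSliceRow (m+1) j (by omega) (by omega), if_neg (by omega)]
  · -- the last, patched row agrees
    rw [Function.comp_apply,
      pvSliceRow (m+1) m (by omega) (by omega), if_pos (by omega)]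

-- ===== VERDICT (by name: the statement is the Claim_ definition above) =====
theorem generate_end_position_spec : Claim_equal_generate_end_position := by
  intro s _ hs
  unfold Spec_generate_end_position
  exact pvMain s hs
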